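-- pv_equiv track=rewrite | github.com/aws/aws-sam-cli | samcli/hook_packages/terraform/hooks/prepare/layer_linking.py | _clean_references_list
-- ===== SOURCE A (Python) =====
-- from typing import List
--
-- def _clean_references_list(references: List[str]) -> List[str]:
--     """
--     Return a new copy of the complete references list.
--
--     e.g. given a list of references like
--     [
--         'aws_lambda_layer_version.layer1[0].arn',
--         'aws_lambda_layer_version.layer1[0]',
--         'aws_lambda_layer_version.layer1',
--     ]
--     We want only the first complete reference ('aws_lambda_layer_version.layer1[0].arn')
--
--     Parameters
--     ----------
--     references: List[str]
--         A list of reference strings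
--
--     Returns
--     -------
--     List[str]
--         A copy of a cleaned list of reference strings
--     """
--     cleaned_references = []
--     references.sort(reverse=True)
--     if not references:
--         return []
--     cleaned_references.append(references[0])
--     for i in range(1, len(references)):
--         if not cleaned_references[-1].startswith(references[i]):
--             cleaned_references.append(references[i])
--     return cleaned_references
-- ===== SOURCE B (Python) =====
-- from typing import List
--
-- def _clean_references_list(references: List[str]) -> List[str]:
--     # Same observable in-place sort as the original; return value built from a
--     # prefix index instead of a greedy last-kept scan.
--     references.sort(reverse=True)
--     proper_prefixes = set()
--     for s in references:
--         for k in range(len(s)):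
--             proper_prefixes.add(s[:k])
--     cleaned = []
--     for s in references:
--         if s not in proper_prefixes and (not cleaned or cleaned[-1] != s):
--             cleaned.append(s)
--     return cleaned
-- ===== Notes on version B (the rewrite author's own statement) =====
-- stated objective: alternative
-- what changed: Replaces the greedy scan that compares each reference to the last kept element with a global prefix index: a set of every proper prefix of every reference is built once, and a reference survives iff it is not in that set (with adjacent dedup of equal strings); the in-place descending sort is kept.
import Mathlib
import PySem

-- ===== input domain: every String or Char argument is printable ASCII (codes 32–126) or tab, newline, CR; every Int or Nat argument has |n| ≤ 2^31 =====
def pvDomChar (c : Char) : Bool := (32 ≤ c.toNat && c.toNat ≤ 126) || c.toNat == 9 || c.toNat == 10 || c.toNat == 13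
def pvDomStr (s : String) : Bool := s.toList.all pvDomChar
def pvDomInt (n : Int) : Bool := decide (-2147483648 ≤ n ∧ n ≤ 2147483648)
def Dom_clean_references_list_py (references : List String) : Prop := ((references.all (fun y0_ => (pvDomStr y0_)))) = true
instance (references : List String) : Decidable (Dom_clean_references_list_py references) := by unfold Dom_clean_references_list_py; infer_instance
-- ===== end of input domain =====

-- B replaces A's greedy compare-with-last-kept scan by a global set of all proper prefixes
-- (objective: alternative, not faster). Both Pythons sort the argument in place identically;
-- the equivalence proved here is about the RETURN value.

-- ===== PORT A =====
-- 'for i in range(1, len(references))' reads references[i] in order: a fold over the tail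
-- of the sorted list; cleaned[-1] is PySem.List.pyGet? cleaned (-1) (cleaned is never empty there).
def cleanStepA (cleaned : List String) (r : String) : List String :=
  if !(PySem.Str.startswith ((PySem.List.pyGet? cleaned (-1)).getD "") r) then cleaned ++ [r]
  else cleaned

def clean_references_list_py (references : List String) : List String :=
  match PySem.List.sorted references (fun x => x) true with
  | [] => []
  | r0 :: rest => rest.foldl cleanStepA [r0]

-- ===== PORT B =====
-- the set of every proper prefix s[:k], 0 ≤ k < len(s), of every reference
def prefixSetB (refs : List String) : PySem.Set String :=
  refs.foldl
    (fun pre s => (PySem.List.pyRange 0 (PySem.Str.len s) 1).foldl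
      (fun pre k => PySem.Set.add pre (PySem.Str.slice s none (some k))) pre)
    PySem.Set.empty

def cleanStepB (prefixes : PySem.Set String) (cleaned : List String) (s : String) : List String :=
  if !(PySem.Set.contains prefixes s)
      && (cleaned.isEmpty || !(((PySem.List.pyGet? cleaned (-1)).getD "") == s))
  then cleaned ++ [s] else cleaned

def clean_references_list_py_alt (references : List String) : List String :=
  let refs := PySem.List.sorted references (fun x => x) true
  refs.foldl (cleanStepB (prefixSetB refs)) []

-- ===== PRECONDITION & SPEC =====
def Spec_clean_references_list_py (references : List String) (out : List String) : Prop := out = clean_references_list_py_alt references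
instance (references : List String) (out : List String) : Decidable (Spec_clean_references_list_py references out) := by unfold Spec_clean_references_list_py; infer_instance

-- ===== CLAIM (what is proved, stated in full; the proofs are below) =====
def Claim_equal_clean_references_list_py : Prop := ∀ (references : List String), Dom_clean_references_list_py references → Spec_clean_references_list_py references (clean_references_list_py references)

-- ===== LEMMAS AND PROOFS =====

-- a list is ≤ itself with anything appended (lexicographic order)
lemma le_append_right (l s : List Char) : l ≤ l ++ s := by
  rw [← not_lt]
  show ¬ List.Lex (· < ·) (l ++ s) l
  induction l with
  | nil => intro h; cases h
  | cons a l ih =>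
    intro h
    cases h with
    | cons h => exact ih h
    | rel h => exact lt_irrefl a h

lemma prefix_le {p t : List Char} (h : p <+: t) : p ≤ t := by
  obtain ⟨r, rfl⟩ := h
  exact le_append_right p r

-- lexicographically between a prefix and its extension means sharing that prefix
lemma prefix_between : ∀ (p u t : List Char), p ≤ u → u ≤ t → p <+: t → p <+: u := by
  intro p
  induction p with
  | nil => intro u t _ _ _; exact List.nil_prefix
  | cons c p' ih =>
    intro u t h1 h2 hpre
    obtain ⟨t', rfl, hpre'⟩ : ∃ t', t = c :: t' ∧ p' <+: t' := by
      cases t with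
      | nil => exact absurd hpre (by simp)
      | cons d t' =>
        rw [List.cons_prefix_cons] at hpre
        exact ⟨t', by rw [hpre.1], hpre.2⟩
    cases u with
    | nil =>
      rw [← not_lt] at h1
      exact absurd List.Lex.nil h1
    | cons d u' =>
      rw [← not_lt] at h1 h2
      have hcd : c = d := by
        rcases lt_trichotomy c d with h | h | h
        · exact absurd (List.Lex.rel h) h2
        · exact h
        · exact absurd (List.Lex.rel h) h1
      subst hcd
      have h1' : p' ≤ u' := by
        rw [← not_lt]; intro hl; exact h1 (List.Lex.cons hl)
      have h2' : u' ≤ t' := by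
        rw [← not_lt]; intro hl; exact h2 (List.Lex.cons hl)
      rw [List.cons_prefix_cons]
      exact ⟨rfl, ih u' t' h1' h2' hpre'⟩

lemma str_prefix_le {p t : String} (h : p.toList <+: t.toList) : p ≤ t := by
  rw [String.le_iff_toList_le]; exact prefix_le h

lemma str_prefix_between {p u t : String} (h1 : p ≤ u) (h2 : u ≤ t)
    (h : p.toList <+: t.toList) : p.toList <+: u.toList := by
  rw [String.le_iff_toList_le] at h1 h2
  exact prefix_between _ _ _ h1 h2 h

-- y is a slice s[:k] with 0 ≤ k < len(s) iff y is a proper prefix of s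
lemma slice_proper_prefix (s y : String) :
    (∃ k ∈ PySem.List.pyRange 0 (PySem.Str.len s) 1, y = PySem.Str.slice s none (some k)) ↔
    (y.toList <+: s.toList ∧ y ≠ s) := by
  constructor
  · rintro ⟨k, hk, rfl⟩
    rw [PySem.List.mem_pyRange_one] at hk
    simp only [PySem.Str.len_eq] at hk
    have htl : (PySem.Str.slice s none (some k)).toList = s.toList.take k.toNat := by
      simp [PySem.List.slice_to _ hk.1]
    constructor
    · rw [htl]; exact List.take_prefix _ _
    · intro he
      have : (PySem.Str.slice s none (some k)).toList.length = s.toList.length := by rw [he]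
      rw [htl, List.length_take] at this
      omega
  · rintro ⟨hpre, hne⟩
    refine ⟨(y.toList.length : Int), ?_, ?_⟩
    · rw [PySem.List.mem_pyRange_one]
      simp only [PySem.Str.len_eq]
      have hle := hpre.length_le
      have hlt : y.toList.length ≠ s.toList.length := by
        intro he
        exact hne (String.toList_inj.mp (List.IsPrefix.eq_of_length hpre he))
      omega
    · apply String.toList_inj.mp
      have : (PySem.Str.slice s none (some (y.toList.length : Int))).toList
          = s.toList.take y.toList.length := by
        simp [PySem.List.slice_to _ (Int.natCast_nonneg _)]
      rw [this]
      exact List.prefix_iff_eq_take.mp hpre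

-- membership in B's prefix set = being a proper prefix of some reference
lemma mem_prefixFold (refs : List String) : ∀ (pre : PySem.Set String) (y : String),
    (y ∈ refs.foldl (fun pre s => (PySem.List.pyRange 0 (PySem.Str.len s) 1).foldl
      (fun pre k => PySem.Set.add pre (PySem.Str.slice s none (some k))) pre) pre) ↔
    (y ∈ pre ∨ ∃ t ∈ refs, y.toList <+: t.toList ∧ y ≠ t) := by
  induction refs with
  | nil => intro pre y; simp
  | cons s refs ih =>
    intro pre y
    rw [List.foldl_cons, ih]
    rw [PySem.Set.mem_foldl_add (f := fun k => PySem.Str.slice s none (some k))]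
    rw [show (∃ b ∈ PySem.List.pyRange 0 (PySem.Str.len s) 1, y = PySem.Str.slice s none (some b)) ↔
        (y.toList <+: s.toList ∧ y ≠ s) from slice_proper_prefix s y]
    constructor
    · rintro ((hy | hy) | ⟨t, ht, hp⟩)
      · exact Or.inl hy
      · exact Or.inr ⟨s, List.mem_cons_self .., hy⟩
      · exact Or.inr ⟨t, List.mem_cons_of_mem _ ht, hp⟩
    · rintro (hy | ⟨t, ht, hp⟩)
      · exact Or.inl (Or.inl hy)
      · rcases List.mem_cons.1 ht with rfl | ht'
        · exact Or.inl (Or.inr hp)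
        · exact Or.inr ⟨t, ht', hp⟩

lemma mem_prefixSetB (refs : List String) (y : String) :
    y ∈ prefixSetB refs ↔ ∃ t ∈ refs, y.toList <+: t.toList ∧ y ≠ t := by
  unfold prefixSetB
  rw [mem_prefixFold]
  simp [PySem.Set.empty]

-- the main loop equivalence, over the common descending-sorted tail
lemma loop_eq (L : List String) :
    ∀ (rest acc : List String), acc ≠ [] →
    (∀ c ∈ acc, c ∈ L) →
    acc.getLast?.getD "" ∈ acc →
    (∀ c ∈ acc, acc.getLast?.getD "" ≤ c) →
    (∀ u ∈ rest, u ∈ L) →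
    (∀ u ∈ rest, u ≤ acc.getLast?.getD "") →
    rest.Pairwise (fun a b => b ≤ a) →
    (∀ t ∈ L, t ∈ rest ∨ ∃ c ∈ acc, t.toList <+: c.toList) →
    rest.foldl cleanStepA acc = rest.foldl (cleanStepB (prefixSetB L)) acc := by
  intro rest
  induction rest with
  | nil => intros; rfl
  | cons s rest' ih =>
    intro acc hacc haccL hlastmem hmin hrestL hk hrest hcover
    have hie : acc.isEmpty = false := by
      rw [Bool.eq_false_iff]; intro h; exact hacc (List.isEmpty_iff.1 h)
    have hks : s ≤ acc.getLast?.getD "" := hk s (List.mem_cons_self ..)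
    by_cases hsw : PySem.Str.startswith (acc.getLast?.getD "") s = true
    · -- A drops s; B drops s too
      simp only [PySem.Str.startswith_eq] at hsw
      have hpre : s.toList <+: (acc.getLast?.getD "").toList :=
        (PySem.Chars.startswith_iff (s := (acc.getLast?.getD "").toList) (p := s.toList)).1 hsw
      have hA : cleanStepA acc s = acc := by
        simp [cleanStepA, PySem.List.pyGet?_neg_one, hsw]
      have hB : cleanStepB (prefixSetB L) acc s = acc := by
        by_cases hes : acc.getLast?.getD "" = s
        · simp [cleanStepB, PySem.List.pyGet?_neg_one, hie, hes]
        · have hmem : s ∈ prefixSetB L := by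
            rw [mem_prefixSetB]
            exact ⟨acc.getLast?.getD "", haccL _ hlastmem, hpre, fun he => hes he.symm⟩
          simp [cleanStepB, PySem.List.pyGet?_neg_one, hmem]
      rw [List.foldl_cons, List.foldl_cons, hA, hB]
      refine ih acc hacc haccL hlastmem hmin ?_ ?_ hrest.of_cons ?_
      · intro u hu; exact hrestL u (List.mem_cons_of_mem _ hu)
      · intro u hu
        exact le_trans (List.pairwise_cons.1 hrest |>.1 u hu) (str_prefix_le hpre)
      · intro t ht
        rcases hcover t ht with ht' | ht'
        · rcases List.mem_cons.1 ht' with rfl | ht''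
          · exact Or.inr ⟨acc.getLast?.getD "", hlastmem, hpre⟩
          · exact Or.inl ht''
        · exact Or.inr ht'
    · -- A keeps s; B keeps s too
      simp only [PySem.Str.startswith_eq, Bool.not_eq_true] at hsw
      have hneq : acc.getLast?.getD "" ≠ s := by
        intro he
        have hT : PySem.Chars.startswith (acc.getLast?.getD "").toList s.toList = true :=
          (PySem.Chars.startswith_iff (s := (acc.getLast?.getD "").toList)
            (p := s.toList)).2 (he ▸ List.prefix_refl _)
        rw [hsw] at hT
        exact Bool.false_ne_true hT
      have hnm : s ∉ prefixSetB L := by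
        rw [mem_prefixSetB]
        rintro ⟨t, htL, hpre, hne⟩
        rcases hcover t htL with ht' | ⟨c, hc, htc⟩
        · rcases List.mem_cons.1 ht' with rfl | ht''
          · exact hne rfl
          · exact hne (le_antisymm (str_prefix_le hpre)
              (List.pairwise_cons.1 hrest |>.1 t ht''))
        · have hsk : s.toList <+: (acc.getLast?.getD "").toList :=
            str_prefix_between hks (hmin c hc) (hpre.trans htc)
          have hT : PySem.Chars.startswith (acc.getLast?.getD "").toList s.toList = true :=
            (PySem.Chars.startswith_iff (s := (acc.getLast?.getD "").toList)
              (p := s.toList)).2 hsk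
          rw [hsw] at hT
          exact Bool.false_ne_true hT
      have hA : cleanStepA acc s = acc ++ [s] := by
        simp [cleanStepA, PySem.List.pyGet?_neg_one, hsw]
      have hB : cleanStepB (prefixSetB L) acc s = acc ++ [s] := by
        simp [cleanStepB, PySem.List.pyGet?_neg_one, hnm, hie, hneq]
      have hlast' : (acc ++ [s]).getLast?.getD "" = s := by simp
      have hsL : s ∈ L := hrestL s (List.mem_cons_self ..)
      rw [List.foldl_cons, List.foldl_cons, hA, hB]
      refine ih (acc ++ [s]) (by simp) ?_ ?_ ?_ ?_ ?_ hrest.of_cons ?_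
      · intro c hc
        rcases List.mem_append.1 hc with hc' | hc'
        · exact haccL c hc'
        · rw [List.mem_singleton.1 hc']; exact hsL
      · rw [hlast']; exact List.mem_append_right _ (List.mem_singleton_self _)
      · intro c hc
        rw [hlast']
        rcases List.mem_append.1 hc with hc' | hc'
        · exact le_trans hks (hmin c hc')
        · rw [List.mem_singleton.1 hc']
      · intro u hu; exact hrestL u (List.mem_cons_of_mem _ hu)
      · intro u hu
        rw [hlast']
        exact List.pairwise_cons.1 hrest |>.1 u hu
      · intro t ht
        rcases hcover t ht with ht' | ⟨c, hc, htc⟩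
        · rcases List.mem_cons.1 ht' with rfl | ht''
          · exact Or.inr ⟨t, List.mem_append_right _ (List.mem_singleton_self _),
              List.prefix_refl _⟩
          · exact Or.inl ht''
        · exact Or.inr ⟨c, List.mem_append_left _ hc, htc⟩

-- ===== VERDICT (by name: the statement is the Claim_ definition above) =====
theorem clean_references_list_py_spec : Claim_equal_clean_references_list_py := by
  intro references _hdom
  unfold Spec_clean_references_list_py clean_references_list_py clean_references_list_py_alt
  cases h : PySem.List.sorted references (fun x => x) true with
  | nil => simp
  | cons r0 rest =>
    have hmax : ∀ y ∈ r0 :: rest, y ≤ r0 := by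
      intro y hy
      exact PySem.List.key_head_sorted_rev_ge references (fun x => x) h y
        ((PySem.List.mem_sorted references (fun x => x) true y).1 (h ▸ hy))
    have hdesc : (r0 :: rest).Pairwise (fun a b : String => b ≤ a) := by
      have := PySem.List.sorted_pairwise_rev (xs := references) (key := fun x => x)
      rw [h] at this
      exact this
    have hfirst : cleanStepB (prefixSetB (r0 :: rest)) [] r0 = [r0] := by
      have hnp : r0 ∉ prefixSetB (r0 :: rest) := by
        intro hc
        obtain ⟨t, htmem, hpre, hne⟩ := (mem_prefixSetB _ _).1 hc
        exact hne (le_antisymm (str_prefix_le hpre) (hmax t htmem))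
      simp [cleanStepB, hnp]
    rw [List.foldl_cons, hfirst]
    apply loop_eq
    · simp
    · simp
    · simp
    · simp
    · intro u hu; exact List.mem_cons_of_mem _ hu
    · intro u hu
      simpa using hmax u (List.mem_cons_of_mem _ hu)
    · exact hdesc.of_cons
    · intro t ht
      rcases List.mem_cons.1 ht with rfl | h'
      · exact Or.inr ⟨t, by simp⟩
      · exact Or.inl h'
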